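-- pv_equiv track=rewrite | github.com/fayfoxcat/snake | src/base/single/检测屏蔽端口.py | format_ports
-- ===== SOURCE A (Python) =====
-- def format_ports(ports):
--     if not ports:
--         return ""
--     ports.sort()
--     ranges = []
--     start = ports[0]
--     for i in range(1, len(ports)):
--         if ports[i] != ports[i - 1] + 1:
--             end = ports[i - 1]
--             if start == end:
--                 ranges.append(str(start))
--             else:
--                 ranges.append(f"{start}~{end}")
--             start = ports[i]
--     if start == ports[-1]:
--         ranges.append(str(start))
--     else:
--         ranges.append(f"{start}~{ports[-1]}")
--     return ', '.join(ranges)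
-- ===== SOURCE B (Python) =====
-- from itertools import groupby
--
--
-- def format_ports(ports):
--     if not ports:
--         return ""
--     ports.sort()
--     parts = []
--     for _, grp in groupby(enumerate(ports), key=lambda p: p[1] - p[0]):
--         vals = [v for _, v in grp]
--         parts.append(str(vals[0]) if len(vals) == 1 else f"{vals[0]}~{vals[-1]}")
--     return ', '.join(parts)
-- ===== Notes on version B (the rewrite author's own statement) =====
-- stated objective: idiomatic
-- what changed: Replaced A's hand-rolled stateful start/end loop over indices with itertools.groupby over enumerate(ports) keyed by value-minus-index (constant across a consecutive run), formatting each group from its first/last element.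
import Mathlib
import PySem

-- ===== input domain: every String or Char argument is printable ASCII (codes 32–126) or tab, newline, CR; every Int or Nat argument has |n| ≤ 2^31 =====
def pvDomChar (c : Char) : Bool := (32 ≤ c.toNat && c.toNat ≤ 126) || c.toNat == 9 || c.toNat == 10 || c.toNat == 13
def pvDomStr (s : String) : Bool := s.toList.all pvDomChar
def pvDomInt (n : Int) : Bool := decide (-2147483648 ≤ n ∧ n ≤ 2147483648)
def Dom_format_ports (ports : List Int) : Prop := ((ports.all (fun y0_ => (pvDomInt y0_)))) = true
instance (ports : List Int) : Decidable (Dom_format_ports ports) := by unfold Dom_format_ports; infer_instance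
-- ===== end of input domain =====

-- B replaces A's hand-rolled stateful start/end loop by an itertools.groupby grouping of
-- enumerate(ports) keyed by value-minus-index (idiomatic decomposition, same cost).
-- Both A and B sort the argument in place (ports.sort()); the equivalence proved here is
-- about the RETURN value (B performs the same mutation).

-- ===== PORT A =====
def format_ports (ports : List Int) : String :=
  if ports = [] then "" else
    let ps := PySem.List.sorted ports (fun x => x) false
    let st := (PySem.List.pyRange 1 (PySem.List.len ps) 1).foldl
      (fun (st : List String × Int) i =>
        if PySem.List.pyGetD ps i 0 ≠ PySem.List.pyGetD ps (i - 1) 0 + 1 then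
          let e := PySem.List.pyGetD ps (i - 1) 0
          ((if st.2 = e then st.1 ++ [PySem.Int.toStr st.2]
            else st.1 ++ [PySem.Int.toStr st.2 ++ "~" ++ PySem.Int.toStr e]),
           PySem.List.pyGetD ps i 0)
        else st)
      (([] : List String), PySem.List.pyGetD ps 0 0)
    PySem.Str.join ", "
      (if st.2 = PySem.List.pyGetD ps (-1) 0 then st.1 ++ [PySem.Int.toStr st.2]
       else st.1 ++ [PySem.Int.toStr st.2 ++ "~" ++ PySem.Int.toStr (PySem.List.pyGetD ps (-1) 0)])

-- ===== PORT B =====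
-- itertools.groupby: take the maximal prefix with the given key value
def takeRun (c : Int) : List (Int × Int) → (List (Int × Int) × List (Int × Int))
  | [] => ([], [])
  | p :: ps =>
    if p.2 - p.1 = c then
      let gr := takeRun c ps
      (p :: gr.1, gr.2)
    else ([], p :: ps)

theorem takeRun_rest_le (c : Int) : ∀ ps : List (Int × Int), (takeRun c ps).2.length ≤ ps.length := by
  intro ps
  induction ps with
  | nil => simp [takeRun]
  | cons p ps ih =>
    simp only [takeRun]
    split
    · simpa using Nat.le_succ_of_le ih
    · simp

-- itertools.groupby(·, key=lambda p: p[1] - p[0]) as a list of groups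
def groupRuns : List (Int × Int) → List (List (Int × Int))
  | [] => []
  | p :: ps =>
    (p :: (takeRun (p.2 - p.1) ps).1) :: groupRuns (takeRun (p.2 - p.1) ps).2
termination_by ps => ps.length
decreasing_by
  exact Nat.lt_succ_of_le (takeRun_rest_le _ _)

-- the body of B's per-group formatting (str(vals[0]) if len(vals)==1 else f"{vals[0]}~{vals[-1]}")
def fmtGroup (g : List (Int × Int)) : String :=
  let vals := g.map (·.2)
  if vals.length = 1 then PySem.Int.toStr (vals.headD 0)
  else PySem.Int.toStr (vals.headD 0) ++ "~" ++ PySem.Int.toStr (vals.getLastD 0)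

def format_ports_alt (ports : List Int) : String :=
  if ports = [] then "" else
    let ps := PySem.List.sorted ports (fun x => x) false
    PySem.Str.join ", " ((groupRuns (PySem.List.enumerate ps 0)).map fmtGroup)

-- ===== PRECONDITION & SPEC =====
def Spec_format_ports (ports : List Int) (out : String) : Prop := out = format_ports_alt ports
instance (ports : List Int) (out : String) : Decidable (Spec_format_ports ports out) := by unfold Spec_format_ports; infer_instance

-- ===== CLAIM (what is proved, stated in full; the proofs are below) =====
def Claim_equal_format_ports : Prop := ∀ (ports : List Int), Dom_format_ports ports → Spec_format_ports ports (format_ports ports)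

-- ===== LEMMAS AND PROOFS =====

-- formatting of one run of consecutive values from s to e
def fmt (s e : Int) : String :=
  if s = e then PySem.Int.toStr s else PySem.Int.toStr s ++ "~" ++ PySem.Int.toStr e

-- length of the leading chain of consecutive successors of p, and the remainder
def chain : Int → List Int → Nat × List Int
  | _, [] => (0, [])
  | p, x :: xs => if x = p + 1 then ((chain x xs).1 + 1, (chain x xs).2) else (0, x :: xs)

theorem chain_snd_eq_drop : ∀ (t : List Int) (p : Int), (chain p t).2 = t.drop (chain p t).1 := by
  intro t
  induction t with
  | nil => intro p; simp [chain]
  | cons x xs ih =>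
    intro p
    simp only [chain]
    split
    · simpa using ih x
    · simp

-- elementwise spec of A's loop: current run start s, previous value p, remaining values
def runsSpec : Int → Int → List Int → List String
  | s, p, [] => [fmt s p]
  | s, p, x :: xs => if x ≠ p + 1 then fmt s p :: runsSpec x x xs else runsSpec s x xs

-- run-at-a-time spec of B: mutual pair
mutual
def runsChain (x : Int) (t : List Int) : List String :=
  fmt x (x + (chain x t).1) :: tailRuns (chain x t).2
termination_by 2 * t.length + 1
decreasing_by
  have h := chain_snd_eq_drop t x
  have : (chain x t).2.length ≤ t.length := by rw [h]; simp
  omega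

def tailRuns : List Int → List String
  | [] => []
  | y :: ys => runsChain y ys
termination_by t => 2 * t.length
decreasing_by
  simp only [List.length_cons]; omega
end

theorem runsSpec_eq_chain : ∀ (t : List Int) (s p : Int),
    runsSpec s p t = fmt s (p + (chain p t).1) :: tailRuns (chain p t).2 := by
  intro t
  induction t with
  | nil => intro s p; simp [runsSpec, chain, tailRuns]
  | cons x xs ih =>
    intro s p
    simp only [runsSpec, chain]
    by_cases hx : x = p + 1
    · subst hx
      rw [if_neg (by simp), if_pos rfl, ih s (p + 1)]
      congr 2
      push_cast; ring
    · rw [if_pos (by simpa using hx), if_neg hx]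
      rw [ih x x, tailRuns, runsChain]
      simp

-- ---- A side ----

-- A's loop body
def bodyA (ps : List Int) (st : List String × Int) (i : Int) : List String × Int :=
  if PySem.List.pyGetD ps i 0 ≠ PySem.List.pyGetD ps (i - 1) 0 + 1 then
    ((if st.2 = PySem.List.pyGetD ps (i - 1) 0 then st.1 ++ [PySem.Int.toStr st.2]
      else st.1 ++ [PySem.Int.toStr st.2 ++ "~" ++ PySem.Int.toStr (PySem.List.pyGetD ps (i - 1) 0)]),
     PySem.List.pyGetD ps i 0)
  else st

theorem append_fmt (acc : List String) (s e : Int) :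
    (if s = e then acc ++ [PySem.Int.toStr s]
     else acc ++ [PySem.Int.toStr s ++ "~" ++ PySem.Int.toStr e]) = acc ++ [fmt s e] := by
  unfold fmt; split <;> simp_all

theorem loopA (ps : List Int) : ∀ (n k : Nat) (acc : List String) (s : Int),
    k < ps.length → n = ps.length - (k + 1) →
    (let st := (PySem.List.pyRange ((k : Int) + 1) (ps.length : Int) 1).foldl (bodyA ps) (acc, s);
     (if st.2 = PySem.List.pyGetD ps (-1) 0 then st.1 ++ [PySem.Int.toStr st.2]
      else st.1 ++ [PySem.Int.toStr st.2 ++ "~" ++ PySem.Int.toStr (PySem.List.pyGetD ps (-1) 0)]))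
      = acc ++ runsSpec s (ps.getD k 0) (ps.drop (k + 1)) := by
  intro n
  induction n with
  | zero =>
    intro k acc s hk hn
    have hkl : k + 1 = ps.length := by omega
    have hne : ps ≠ [] := by intro h; simp [h] at hk
    rw [PySem.List.pyRange_one_eq_nil (by omega)]
    simp only [List.foldl_nil]
    rw [append_fmt]
    have hlast : PySem.List.pyGetD ps (-1) 0 = ps.getD k 0 := by
      rw [PySem.List.pyGetD_neg_ofNat ps 1 0 (by omega) (by omega)]
      rw [List.getD_eq_getElem ps 0 (by omega)]
      congr 1
      omega
    rw [hlast]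
    have : ps.drop (k + 1) = [] := by
      apply List.drop_eq_nil_of_le; omega
    rw [this]
    rfl
  | succ m ih =>
    intro k acc s hk hn
    have hk1 : k + 1 < ps.length := by omega
    rw [PySem.List.pyRange_one_cons (by omega)]
    simp only [List.foldl_cons]
    have hg1 : PySem.List.pyGetD ps ((k : Int) + 1) 0 = ps.getD (k + 1) 0 := by
      have : ((k : Int) + 1) = ((k + 1 : Nat) : Int) := by push_cast; ring
      rw [this, PySem.List.pyGetD_natCast]
    have hg0 : PySem.List.pyGetD ps ((k : Int) + 1 - 1) 0 = ps.getD k 0 := by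
      have : ((k : Int) + 1 - 1) = ((k : Nat) : Int) := by ring
      rw [this, PySem.List.pyGetD_natCast]
    have hdrop : ps.drop (k + 1) = ps.getD (k + 1) 0 :: ps.drop (k + 2) := by
      rw [List.getD_eq_getElem ps 0 hk1]
      rw [List.drop_eq_getElem_cons hk1]
    have harith : ((k : Int) + 1 + 1) = (((k + 1 : Nat) : Int) + 1) := by push_cast; ring
    by_cases hbr : ps.getD (k + 1) 0 = ps.getD k 0 + 1
    · have hb : bodyA ps (acc, s) ((k : Int) + 1) = (acc, s) := by
        unfold bodyA
        rw [hg1, hg0]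
        rw [if_neg (by simpa using hbr)]
      rw [hb, harith, ih (k + 1) acc s hk1 (by omega), hdrop]
      simp only [runsSpec]
      rw [if_neg (by simpa using hbr)]
    · have hb : bodyA ps (acc, s) ((k : Int) + 1)
          = (acc ++ [fmt s (ps.getD k 0)], ps.getD (k + 1) 0) := by
        unfold bodyA
        rw [hg1, hg0]
        rw [if_pos (by simpa using hbr)]
        rw [append_fmt]
      rw [hb, harith, ih (k + 1) (acc ++ [fmt s (ps.getD k 0)]) (ps.getD (k + 1) 0) hk1 (by omega), hdrop]
      simp only [runsSpec]
      rw [if_pos (by simpa using hbr)]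
      simp


theorem chain_fst_le : ∀ (t : List Int) (p : Int), (chain p t).1 ≤ t.length := by
  intro t
  induction t with
  | nil => intro p; simp [chain]
  | cons x xs ih =>
    intro p
    simp only [chain]
    split
    · simpa using Nat.succ_le_succ (ih x)
    · simp

theorem takeRun_enumerate : ∀ (t : List Int) (j p : Int),
    takeRun (p - (j - 1)) (PySem.List.enumerate t j)
      = (PySem.List.enumerate (t.take (chain p t).1) j,
         PySem.List.enumerate (t.drop (chain p t).1) (j + (chain p t).1)) := by
  intro t
  induction t with
  | nil => intro j p; simp [takeRun, chain, PySem.List.enumerate_nil]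
  | cons x xs ih =>
    intro j p
    rw [PySem.List.enumerate_cons]
    simp only [takeRun, chain]
    by_cases hx : x = p + 1
    · rw [if_pos (show x - j = p - (j - 1) by omega), if_pos hx]
      have htail := ih (j + 1) x
      rw [show x - (j + 1 - 1) = p - (j - 1) by omega] at htail
      rw [htail]
      simp only [List.take_succ_cons, List.drop_succ_cons, PySem.List.enumerate_cons]
      rw [show j + 1 + (((chain x xs).1 : Nat) : Int) = j + (((chain x xs).1 + 1 : Nat) : Int) from by push_cast; ring]
    · rw [if_neg (show ¬(x - j = p - (j - 1)) by omega), if_neg hx]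
      simp [PySem.List.enumerate_cons]

theorem chain_take_getLast : ∀ (t : List Int) (p : Int),
    (p :: t.take (chain p t).1).getLastD 0 = p + (chain p t).1 := by
  intro t
  induction t with
  | nil => intro p; simp [chain]
  | cons x xs ih =>
    intro p
    simp only [chain]
    by_cases hx : x = p + 1
    · rw [if_pos hx]
      simp only [List.take_succ_cons, List.getLastD_cons]
      have hi := ih x
      simp only [List.getLastD_cons] at hi ⊢
      rw [hi]
      push_cast; omega
    · rw [if_neg hx]; simp

theorem fmtGroup_run (t : List Int) (j x : Int) :
    fmtGroup ((j, x) :: PySem.List.enumerate (t.take (chain x t).1) (j + 1))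
      = fmt x (x + (chain x t).1) := by
  unfold fmtGroup
  simp only [List.map_cons, PySem.List.map_snd_enumerate]
  by_cases h0 : (chain x t).1 = 0
  · rw [h0]
    simp [fmt]
  · have hle := chain_fst_le t x
    rw [if_neg (by simp only [List.length_cons, List.length_take]; omega)]
    rw [show fmt x (x + ((chain x t).1 : Int))
          = PySem.Int.toStr x ++ "~" ++ PySem.Int.toStr (x + ((chain x t).1 : Int)) from by
      unfold fmt; rw [if_neg (by intro h; omega)]]
    rw [show ((x :: t.take (chain x t).1).headD 0) = x from rfl]
    rw [chain_take_getLast t x]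

theorem loopB : ∀ (fuel : Nat) (t : List Int) (x j : Int), t.length ≤ fuel →
    (groupRuns (PySem.List.enumerate (x :: t) j)).map fmtGroup = runsChain x t := by
  intro fuel
  induction fuel with
  | zero =>
    intro t x j hf
    have ht : t = [] := by cases t <;> simp_all
    subst ht
    rw [PySem.List.enumerate_cons, PySem.List.enumerate_nil]
    rw [groupRuns, runsChain]
    simp [groupRuns, takeRun, chain, tailRuns, fmtGroup, fmt]
  | succ m ih =>
    intro t x j hf
    rw [PySem.List.enumerate_cons]
    rw [groupRuns]
    have htr := takeRun_enumerate t (j + 1) x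
    rw [show x - (j + 1 - 1) = x - j by omega] at htr
    rw [htr]
    simp only [List.map_cons]
    rw [fmtGroup_run]
    rw [runsChain]
    congr 1
    rw [chain_snd_eq_drop]
    cases hd : t.drop (chain x t).1 with
    | nil => simp [PySem.List.enumerate_nil, groupRuns, tailRuns]
    | cons y ys =>
      rw [PySem.List.enumerate_cons]
      rw [show tailRuns (y :: ys) = runsChain y ys from by rw [tailRuns]]
      apply ih
      have hlen := List.length_drop (l := t) (i := (chain x t).1)
      rw [hd] at hlen
      simp only [List.length_cons] at hlen
      by_cases h0 : (chain x t).1 = 0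
      · rw [h0] at hd
        simp only [List.drop_zero] at hd
        subst hd
        simp only [List.length_cons] at hf
        omega
      · omega

-- ===== VERDICT (by name: the statement is the Claim_ definition above) =====
theorem format_ports_spec : Claim_equal_format_ports := by
  unfold Claim_equal_format_ports Spec_format_ports
  intro ports _
  unfold format_ports format_ports_alt
  by_cases hp : ports = []
  · simp [hp]
  · rw [if_neg hp, if_neg hp]
    dsimp only
    set ps := PySem.List.sorted ports (fun x => x) false with hps
    have hne : ps ≠ [] := by
      rw [hps]
      simpa [PySem.List.sorted_eq_nil_iff] using hp
    obtain ⟨x, t, hxt⟩ := List.exists_cons_of_ne_nil hne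
    congr 1
    have hA := loopA ps (ps.length - 1) 0 [] (PySem.List.pyGetD ps 0 0)
      (by rw [hxt]; simp) (by omega)
    simp only [Nat.cast_zero, zero_add] at hA
    rw [show PySem.List.len ps = (ps.length : Int) from PySem.List.len_eq ps]
    have hbody : (fun (st : List String × Int) (i : Int) =>
        if PySem.List.pyGetD ps i 0 ≠ PySem.List.pyGetD ps (i - 1) 0 + 1 then
          ((if st.2 = PySem.List.pyGetD ps (i - 1) 0 then st.1 ++ [PySem.Int.toStr st.2]
            else st.1 ++ [PySem.Int.toStr st.2 ++ "~" ++ PySem.Int.toStr (PySem.List.pyGetD ps (i - 1) 0)]),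
           PySem.List.pyGetD ps i 0)
        else st) = bodyA ps := by
      funext st i
      unfold bodyA
      rfl
    rw [hbody, hA]
    have hget0 : ps.getD 0 0 = x := by rw [hxt]; rfl
    have hpg0 : PySem.List.pyGetD ps 0 0 = x := by
      rw [PySem.List.pyGetD_zero, hget0]
    have hdrop1 : ps.drop 1 = t := by rw [hxt]; rfl
    rw [hget0, hpg0, hdrop1]
    rw [hxt]
    rw [loopB t.length t x 0 le_rfl]
    rw [runsSpec_eq_chain]
    rw [runsChain]
    simp
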